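-- pv_equiv track=rewrite | github.com/BenjaminRains/dbt_dental_clinic | etl_pipeline/scripts/analyze_opendental_schema.py | determine_table_importance
-- ===== SOURCE A (Python) =====
-- from typing import Dict, List, Optional, Tuple
--
-- def determine_table_importance(table_name: str, schema_info: Dict, size_info: Dict) -> str:
--     """Determine table importance based on schema and size analysis."""
--     # Critical tables (core business entities) - these are fundamental to dental practice operations
--     critical_tables = ['patient', 'appointment', 'procedurelog', 'claimproc', 'payment']
--     if table_name.lower() in critical_tables:
--         return 'critical'
--
--     # Reference tables (lookup data) - prioritize over size considerations
--     if 'def' in table_name.lower() or 'type' in table_name.lower():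
--         return 'reference'
--
--     # Determine initial importance based on size and business patterns
--     initial_importance = 'standard'
--
--     # Large tables (performance consideration) - automatically important due to size
--     if size_info.get('estimated_row_count', 0) > 1000000:  # 1M+ rows
--         initial_importance = 'important'
--
--     # Insurance and billing related tables (high business value)
--     insurance_billing_patterns = ['insplan', 'patplan', 'carrier', 'claim', 'payment', 'fee']
--     if any(pattern in table_name.lower() for pattern in insurance_billing_patterns):
--         initial_importance = 'important'
--
--     # Clinical procedure related tables (high business value)
--     clinical_patterns = ['procedure', 'treatment', 'diagnosis', 'medication']
--     if any(pattern in table_name.lower() for pattern in clinical_patterns):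
--         initial_importance = 'important'
--
--     # Audit tables (logging/history) - override any size-based importance
--     if 'log' in table_name.lower() or 'hist' in table_name.lower():
--         return 'audit'
--
--     return initial_importance
-- ===== SOURCE B (Python) =====
-- def determine_table_importance(table_name: str, schema_info, size_info) -> str:
--     """Score-based classification: each category contributes a numeric severity
--     level (critical=4 > reference=3 > audit=2 > important=1 > standard=0); all
--     checks are evaluated, the maximum score wins, and the answer is looked up
--     in a level table. No short-circuiting or override chain is needed because
--     a higher level always dominates a lower one."""
--     name = table_name.lower()
--     levels = ('standard', 'important', 'audit', 'reference', 'critical')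
--     score = max(
--         4 * (name in ('patient', 'appointment', 'procedurelog', 'claimproc', 'payment')),
--         3 * ('def' in name or 'type' in name),
--         2 * ('log' in name or 'hist' in name),
--         1 * (size_info.get('estimated_row_count', 0) > 1000000
--              or any(p in name for p in ('insplan', 'patplan', 'carrier', 'claim',
--                                         'payment', 'fee', 'procedure', 'treatment',
--                                         'diagnosis', 'medication'))),
--     )
--     return levels[score]
-- ===== Notes on version B (the rewrite author's own statement) =====
-- stated objective: alternative
-- what changed: Replaced A's mutate-then-override control flow (early returns plus an initial_importance variable reassigned and then conditionally overridden) with an arithmetical max-of-scores formulation: every category check is evaluated unconditionally, mapped to a numeric severity level (critical=4, reference=3, audit=2, important=1), and the label is read from a level table at the maximum score, with no branching priority chain at all.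
import Mathlib
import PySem

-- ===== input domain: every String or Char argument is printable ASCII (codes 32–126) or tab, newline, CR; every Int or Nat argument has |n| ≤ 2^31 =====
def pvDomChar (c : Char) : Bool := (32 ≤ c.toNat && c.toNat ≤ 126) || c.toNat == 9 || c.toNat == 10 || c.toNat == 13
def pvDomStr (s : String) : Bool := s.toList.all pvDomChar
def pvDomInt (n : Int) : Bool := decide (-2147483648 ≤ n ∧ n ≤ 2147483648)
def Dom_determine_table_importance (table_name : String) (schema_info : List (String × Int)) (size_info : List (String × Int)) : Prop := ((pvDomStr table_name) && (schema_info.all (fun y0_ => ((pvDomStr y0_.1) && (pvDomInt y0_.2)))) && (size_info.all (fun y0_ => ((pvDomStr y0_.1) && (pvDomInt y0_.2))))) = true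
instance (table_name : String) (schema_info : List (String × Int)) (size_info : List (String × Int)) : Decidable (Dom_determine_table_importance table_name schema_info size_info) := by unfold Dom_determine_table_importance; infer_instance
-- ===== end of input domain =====

-- B replaces A's early-return/override chain by a max-of-severity-scores formulation with a level lookup table; objective: alternative decomposition, same cost.


-- ===== PORT A =====
def determine_table_importance (table_name : String) (schema_info : List (String × Int)) (size_info : List (String × Int)) : String :=
  let critical_tables : List String := ["patient", "appointment", "procedurelog", "claimproc", "payment"]
  if critical_tables.contains (PySem.Str.lower table_name) then "critical"
  else if PySem.Str.isIn "def" (PySem.Str.lower table_name) || PySem.Str.isIn "type" (PySem.Str.lower table_name) then "reference"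
  else
    let initial_importance := "standard"
    let initial_importance := if PySem.Dict.getD (PySem.Dict.mk size_info) "estimated_row_count" 0 > 1000000 then "important" else initial_importance
    let insurance_billing_patterns : List String := ["insplan", "patplan", "carrier", "claim", "payment", "fee"]
    let initial_importance := if insurance_billing_patterns.any (fun p => PySem.Str.isIn p (PySem.Str.lower table_name)) then "important" else initial_importance
    let clinical_patterns : List String := ["procedure", "treatment", "diagnosis", "medication"]
    let initial_importance := if clinical_patterns.any (fun p => PySem.Str.isIn p (PySem.Str.lower table_name)) then "important" else initial_importance
    if PySem.Str.isIn "log" (PySem.Str.lower table_name) || PySem.Str.isIn "hist" (PySem.Str.lower table_name) then "audit"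
    else initial_importance

-- ===== PORT B =====
-- levels[score] never goes out of range (0 ≤ score ≤ 4), so the .getD "" totalization is never the value; exact otherwise.
def determine_table_importance_alt (table_name : String) (schema_info : List (String × Int)) (size_info : List (String × Int)) : String :=
  let name := PySem.Str.lower table_name
  let levels : List String := ["standard", "important", "audit", "reference", "critical"]
  let score : Int :=
    max (max (max
      (4 * (if (["patient", "appointment", "procedurelog", "claimproc", "payment"] : List String).contains name then 1 else 0))
      (3 * (if PySem.Str.isIn "def" name || PySem.Str.isIn "type" name then 1 else 0)))
      (2 * (if PySem.Str.isIn "log" name || PySem.Str.isIn "hist" name then 1 else 0)))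
      (1 * (if PySem.Dict.getD (PySem.Dict.mk size_info) "estimated_row_count" 0 > 1000000
              || (["insplan", "patplan", "carrier", "claim", "payment", "fee", "procedure", "treatment", "diagnosis", "medication"] : List String).any (fun p => PySem.Str.isIn p name) then 1 else 0))
  (PySem.List.pyGet? levels score).getD ""

-- ===== PRECONDITION & SPEC =====
def Spec_determine_table_importance (table_name : String) (schema_info : List (String × Int)) (size_info : List (String × Int)) (out : String) : Prop := out = determine_table_importance_alt table_name schema_info size_info
instance (table_name : String) (schema_info : List (String × Int)) (size_info : List (String × Int)) (out : String) : Decidable (Spec_determine_table_importance table_name schema_info size_info out) := by unfold Spec_determine_table_importance; infer_instance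

-- ===== CLAIM (what is proved, stated in full; the proofs are below) =====
def Claim_equal_determine_table_importance : Prop := ∀ (table_name : String) (schema_info : List (String × Int)) (size_info : List (String × Int)), Dom_determine_table_importance table_name schema_info size_info → Spec_determine_table_importance table_name schema_info size_info (determine_table_importance table_name schema_info size_info)

-- ===== LEMMAS AND PROOFS =====

-- ===== VERDICT (by name: the statement is the Claim_ definition above) =====
theorem determine_table_importance_spec : Claim_equal_determine_table_importance := by
  intro table_name schema_info size_info _
  unfold Spec_determine_table_importance
  simp only [determine_table_importance, determine_table_importance_alt]
  rw [show (["insplan", "patplan", "carrier", "claim", "payment", "fee", "procedure", "treatment", "diagnosis", "medication"] : List String).any (fun p => PySem.Str.isIn p (PySem.Str.lower table_name)) = ((["insplan", "patplan", "carrier", "claim", "payment", "fee"] : List String).any (fun p => PySem.Str.isIn p (PySem.Str.lower table_name)) || (["procedure", "treatment", "diagnosis", "medication"] : List String).any (fun p => PySem.Str.isIn p (PySem.Str.lower table_name))) from by simp [List.any_cons, Bool.or_assoc]]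
  by_cases hs : (1000000 : Int) < PySem.Dict.getD (PySem.Dict.mk size_info) "estimated_row_count" 0 <;>
  cases hc : (["patient", "appointment", "procedurelog", "claimproc", "payment"] : List String).contains (PySem.Str.lower table_name) <;>
  cases h2 : (PySem.Str.isIn "def" (PySem.Str.lower table_name) || PySem.Str.isIn "type" (PySem.Str.lower table_name)) <;>
  cases h3 : (PySem.Str.isIn "log" (PySem.Str.lower table_name) || PySem.Str.isIn "hist" (PySem.Str.lower table_name)) <;>
  cases hi : (["insplan", "patplan", "carrier", "claim", "payment", "fee"] : List String).any (fun p => PySem.Str.isIn p (PySem.Str.lower table_name)) <;>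
  cases hcl : (["procedure", "treatment", "diagnosis", "medication"] : List String).any (fun p => PySem.Str.isIn p (PySem.Str.lower table_name)) <;>
  simp [hs, PySem.List.pyGet?, PySem.List.pyIdx?]
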